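-- pv_equiv track=rewrite | github.com/YamadaNaruto/research_git | src/example_codesmells.py | do_everything
-- ===== SOURCE A (Python) =====
-- def do_everything(a, b, c, d, e, f, g):  # 引数が多すぎる
--     result = 0
--     if a > 0:
--         if b > 0:
--             if c > 0:
--                 if d > 0:
--                     if e > 0:
--                         if f > 0:
--                             if g > 0:  # 深すぎるネスト
--                                 result = a + b + c + d + e + f + g
--                             else:
--                                 result = -1
--                         else:
--                             result = -2
--                     else:
--                         result = -3
--                 else:
--                     result = -4
--             else:
--                 result = -5
--         else:
--             result = -6
--     else:
--         result = -7
--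
--     for i in range(100):
--         for j in range(100):  # 無意味な二重ループ
--             result += 1
--
--     return result
-- ===== SOURCE B (Python) =====
-- def do_everything(a, b, c, d, e, f, g):
--     vals = [a, b, c, d, e, f, g]
--     for i, x in enumerate(vals):
--         if x <= 0:
--             return -(7 - i) + 10000
--     return sum(vals) + 10000
-- ===== Notes on version B (the rewrite author's own statement) =====
-- stated objective: simpler
-- what changed: Replaced the seven-level nested if/else with a single enumerate scan over the list of arguments returning -(7-i) at the first non-positive value, and replaced the 100x100 dummy increment loop with a direct +10000.
import Mathlib
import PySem

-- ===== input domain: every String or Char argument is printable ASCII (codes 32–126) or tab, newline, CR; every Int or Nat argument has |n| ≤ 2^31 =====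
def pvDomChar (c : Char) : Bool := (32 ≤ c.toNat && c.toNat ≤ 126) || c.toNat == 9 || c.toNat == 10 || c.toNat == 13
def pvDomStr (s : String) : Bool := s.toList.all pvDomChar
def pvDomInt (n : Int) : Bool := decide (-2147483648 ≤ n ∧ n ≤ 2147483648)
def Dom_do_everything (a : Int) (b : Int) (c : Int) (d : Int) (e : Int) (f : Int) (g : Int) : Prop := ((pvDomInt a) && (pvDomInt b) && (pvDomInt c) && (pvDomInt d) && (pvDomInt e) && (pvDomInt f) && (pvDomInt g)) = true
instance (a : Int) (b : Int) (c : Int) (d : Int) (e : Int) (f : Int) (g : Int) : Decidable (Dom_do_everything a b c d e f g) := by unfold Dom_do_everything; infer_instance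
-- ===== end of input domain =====

-- B replaces the nested if/else tree with one left-to-right scan over [a..g] and the
-- 100x100 dummy increment loop with a direct +10000 (objective: simpler).

-- ===== PORT A =====
def do_everything (a : Int) (b : Int) (c : Int) (d : Int) (e : Int) (f : Int) (g : Int) : Int :=
  let result : Int :=
    if a > 0 then
      if b > 0 then
        if c > 0 then
          if d > 0 then
            if e > 0 then
              if f > 0 then
                if g > 0 then a + b + c + d + e + f + g
                else -1
              else -2
            else -3
          else -4
        else -5
      else -6
    else -7
  List.foldl
    (fun res _ => List.foldl (fun r _ => r + 1) res (PySem.List.pyRange 0 100 1))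
    result (PySem.List.pyRange 0 100 1)

-- ===== PORT B =====
-- the enumerate loop of Source B: first non-positive element (with its index) wins
def pvScanB : List Int → Int → Option Int
  | [], _ => none
  | x :: xs, i => if x ≤ 0 then some (-(7 - i) + 10000) else pvScanB xs (i + 1)

def do_everything_alt (a : Int) (b : Int) (c : Int) (d : Int) (e : Int) (f : Int) (g : Int) : Int :=
  let vals : List Int := [a, b, c, d, e, f, g]
  match pvScanB vals 0 with
  | some r => r
  | none => vals.sum + 10000

-- ===== PRECONDITION & SPEC =====
def Spec_do_everything (a : Int) (b : Int) (c : Int) (d : Int) (e : Int) (f : Int) (g : Int) (out : Int) : Prop := out = do_everything_alt a b c d e f g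
instance (a : Int) (b : Int) (c : Int) (d : Int) (e : Int) (f : Int) (g : Int) (out : Int) : Decidable (Spec_do_everything a b c d e f g out) := by unfold Spec_do_everything; infer_instance

-- ===== CLAIM (what is proved, stated in full; the proofs are below) =====
def Claim_equal_do_everything : Prop := ∀ (a : Int) (b : Int) (c : Int) (d : Int) (e : Int) (f : Int) (g : Int), Dom_do_everything a b c d e f g → Spec_do_everything a b c d e f g (do_everything a b c d e f g)

-- ===== LEMMAS AND PROOFS =====
theorem pv_foldl_count (l : List Int) : ∀ r : Int,
    List.foldl (fun r _ => r + 1) r l = r + l.length := by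
  induction l with
  | nil => intro r; simp
  | cons x xs ih => intro r; simp [List.foldl, ih]; omega

theorem pv_outer (l : List Int) : ∀ r : Int,
    List.foldl (fun res _ => List.foldl (fun r _ => r + 1) res (PySem.List.pyRange 0 100 1)) r l
      = r + 100 * l.length := by
  induction l with
  | nil => intro r; simp
  | cons x xs ih =>
      intro r
      simp only [List.foldl]
      rw [ih, pv_foldl_count]
      have h : (PySem.List.pyRange 0 100 1).length = 100 := by decide
      rw [h]; simp [List.length]; ring

theorem pv_doA (a b c d e f g : Int) :
    do_everything a b c d e f g =
      (if a > 0 then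
        if b > 0 then
          if c > 0 then
            if d > 0 then
              if e > 0 then
                if f > 0 then
                  if g > 0 then a + b + c + d + e + f + g
                  else -1
                else -2
              else -3
            else -4
          else -5
        else -6
      else -7) + 10000 := by
  unfold do_everything
  rw [pv_outer]
  have h : (PySem.List.pyRange 0 100 1).length = 100 := by decide
  rw [h]; norm_num

-- ===== VERDICT (by name: the statement is the Claim_ definition above) =====
theorem do_everything_spec : Claim_equal_do_everything := by
  intro a b c d e f g _
  unfold Spec_do_everything
  rw [pv_doA]
  unfold do_everything_alt
  split_ifs with ha hb hc hd he hf hg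
  · simp [pvScanB, Int.not_le.mpr ha, Int.not_le.mpr hb, Int.not_le.mpr hc, Int.not_le.mpr hd,
      Int.not_le.mpr he, Int.not_le.mpr hf, Int.not_le.mpr hg]; ring
  · simp [pvScanB, Int.not_le.mpr ha, Int.not_le.mpr hb, Int.not_le.mpr hc, Int.not_le.mpr hd,
      Int.not_le.mpr he, Int.not_le.mpr hf, Int.not_lt.mp hg]
  · simp [pvScanB, Int.not_le.mpr ha, Int.not_le.mpr hb, Int.not_le.mpr hc, Int.not_le.mpr hd,
      Int.not_le.mpr he, Int.not_lt.mp hf]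
  · simp [pvScanB, Int.not_le.mpr ha, Int.not_le.mpr hb, Int.not_le.mpr hc, Int.not_le.mpr hd,
      Int.not_lt.mp he]
  · simp [pvScanB, Int.not_le.mpr ha, Int.not_le.mpr hb, Int.not_le.mpr hc, Int.not_lt.mp hd]
  · simp [pvScanB, Int.not_le.mpr ha, Int.not_le.mpr hb, Int.not_lt.mp hc]
  · simp [pvScanB, Int.not_le.mpr ha, Int.not_lt.mp hb]
  · simp [pvScanB, Int.not_lt.mp ha]
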